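-- pv_equiv track=rewrite | github.com/CodeSquad-2023-BE-Study/Algorithm-Study | JeonHyoChang/week_09/BOJ_03_21314_민겸수.py | maxMK
-- ===== SOURCE A (Python) =====
-- def maxMK(MK):
--     result = ''
--     mCount = 0
--     for i in range(len(MK) - 1):
--         if MK[i] == 'M':
--             mCount += 1
--         else:
--             result += str((10 ** mCount) * 5)
--             mCount = 0
--
--     result += '1' * mCount
--
--     return result
-- ===== SOURCE B (Python) =====
-- def maxMK(MK):
--     # Tokenize s = MK[:-1] into maximal runs of 'M' each ended by one separator
--     # (any non-'M' char): a terminated run of k Ms becomes '5' + k zeros, the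
--     # trailing unterminated run becomes k ones.  Pieces are joined at the end.
--     s = MK[:-1]
--     n = len(s)
--     pieces = []
--     i = 0
--     while i < n:
--         j = i
--         while j < n and s[j] == 'M':
--             j += 1
--         if j == n:
--             pieces.append('1' * (j - i))
--         else:
--             pieces.append('5' + '0' * (j - i))
--         i = j + 1
--     return ''.join(pieces)
-- ===== Notes on version B (the rewrite author's own statement) =====
-- stated objective: alternative
-- what changed: B tokenizes MK[:-1] into maximal M-runs each terminated by one separator and maps each token to its piece ('5'+zeros, or ones for the trailing run), joining the pieces once, instead of A's single pass with a running M-counter, per-separator bignum 10**count computation and repeated string concatenation.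
import Mathlib
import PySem

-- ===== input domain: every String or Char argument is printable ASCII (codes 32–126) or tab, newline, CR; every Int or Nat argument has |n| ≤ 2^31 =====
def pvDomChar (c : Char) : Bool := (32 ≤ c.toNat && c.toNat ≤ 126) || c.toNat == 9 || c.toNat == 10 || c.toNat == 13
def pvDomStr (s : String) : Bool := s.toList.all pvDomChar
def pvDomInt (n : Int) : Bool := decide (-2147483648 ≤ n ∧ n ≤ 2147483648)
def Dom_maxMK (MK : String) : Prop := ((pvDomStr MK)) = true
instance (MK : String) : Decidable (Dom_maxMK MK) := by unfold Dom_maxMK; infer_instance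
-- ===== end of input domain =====

-- B re-implements A by tokenizing MK[:-1] into maximal M-runs each ended by one
-- separator (tokenize-then-map, pieces joined once) instead of A's running
-- counter with repeated string concatenation; same return value on all inputs.

-- ===== PORT A =====
-- Literal port of A: fold over range(len(MK)-1) with state (result, mCount);
-- every index i drawn from the range satisfies 0 ≤ i < len MK, so pyGetD with a
-- dummy default is exactly Python's MK[i] here (it never raises).
def maxMK (MK : String) : String :=
  let l := MK.toList
  let st := (PySem.List.pyRange 0 ((l.length : Int) - 1)).foldl
      (fun (st : List Char × Nat) i =>
        if PySem.List.pyGetD l i ' ' = 'M' then (st.1, st.2 + 1)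
        else (st.1 ++ PySem.Int.toChars ((10 : Int) ^ st.2 * 5), 0))
      ([], 0)
  String.ofList (st.1 ++ List.replicate st.2 '1')

-- ===== PORT B =====
-- inner `while j < n and s[j] == 'M'` of Source B; j < n guards the index, so
-- pyGetD with a dummy default is exactly Python's s[j] here.
def scanMs (s : List Char) (n : Nat) (j : Nat) : Nat :=
  if h : j < n ∧ PySem.List.pyGetD s (j : Int) ' ' = 'M' then scanMs s n (j + 1) else j
termination_by n - j
decreasing_by omega

-- cited by tokLoop's decreasing_by
theorem scanMs_ge (s : List Char) (n : Nat) : ∀ j, j ≤ scanMs s n j := by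
  intro j
  induction hd : n - j using Nat.strong_induction_on generalizing j with
  | _ d ih =>
    rw [scanMs]
    split
    · next h => exact le_trans (by omega) (ih (n - (j + 1)) (by omega) (j + 1) rfl)
    · exact le_refl j

-- outer `while i < n` of Source B, carrying the pieces list
def tokLoop (s : List Char) (n : Nat) (i : Nat) (pieces : List (List Char)) :
    List (List Char) :=
  if i < n then
    let j := scanMs s n i
    if j = n then tokLoop s n (j + 1) (pieces ++ [List.replicate (j - i) '1'])
    else tokLoop s n (j + 1) (pieces ++ ['5' :: List.replicate (j - i) '0'])
  else pieces
termination_by n + 1 - i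
decreasing_by
  · have := scanMs_ge s n i; omega
  · have := scanMs_ge s n i; omega

def maxMK_alt (MK : String) : String :=
  let s := PySem.List.slice MK.toList none (some (-1))   -- MK[:-1]
  String.ofList (tokLoop s s.length 0 []).flatten            -- ''.join(pieces)

-- ===== PRECONDITION & SPEC =====
def Spec_maxMK (MK : String) (out : String) : Prop := out = maxMK_alt MK
instance (MK : String) (out : String) : Decidable (Spec_maxMK MK out) := by unfold Spec_maxMK; infer_instance

-- ===== CLAIM (what is proved, stated in full; the proofs are below) =====
def Claim_equal_maxMK : Prop := ∀ (MK : String), Dom_maxMK MK → Spec_maxMK MK (maxMK MK)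

-- ===== LEMMAS AND PROOFS =====

-- proof-side tokenizer: the pieces Source B's loop collects, described structurally
def tokPieces (t : List Char) : List (List Char) :=
  if h : t = [] then []
  else
    let k := (t.takeWhile (· == 'M')).length
    if k = t.length then [List.replicate k '1']
    else ('5' :: List.replicate k '0') :: tokPieces (t.drop (k + 1))
termination_by t.length
decreasing_by
  have : 0 < t.length := List.length_pos_of_ne_nil h
  simp only [List.length_drop]; omega

-- step function of A's fold, over the character itself
def aStep (st : List Char × Nat) (c : Char) : List Char × Nat :=
  if c = 'M' then (st.1, st.2 + 1)
  else (st.1 ++ PySem.Int.toChars ((10 : Int) ^ st.2 * 5), 0)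

theorem toDigitsCore_five_pow :
    ∀ (m f : Nat) (ds : List Char), m < f →
      Nat.toDigitsCore 10 f (5 * 10 ^ m) ds = '5' :: (List.replicate m '0' ++ ds) := by
  intro m
  induction m with
  | zero =>
    intro f ds hf
    obtain ⟨f', rfl⟩ : ∃ f', f = f' + 1 := ⟨f - 1, by omega⟩
    simp [Nat.toDigitsCore]
    rfl
  | succ m ih =>
    intro f ds hf
    obtain ⟨f', rfl⟩ : ∃ f', f = f' + 1 := ⟨f - 1, by omega⟩
    have hmul : 5 * 10 ^ (m + 1) = (5 * 10 ^ m) * 10 := by ring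
    have hdiv : 5 * 10 ^ (m + 1) / 10 = 5 * 10 ^ m := by
      rw [hmul]; exact Nat.mul_div_cancel _ (by norm_num)
    have hmod : 5 * 10 ^ (m + 1) % 10 = 0 := by rw [hmul]; exact Nat.mul_mod_left _ _
    have hne : ¬ (5 * 10 ^ m = 0) := by positivity
    simp only [Nat.toDigitsCore, hdiv, hmod, hne, if_false]
    rw [ih f' (Nat.digitChar 0 :: ds) (by omega)]
    simp [List.replicate_succ', show Nat.digitChar 0 = '0' from rfl]

theorem toChars_five_pow (m : Nat) :
    PySem.Int.toChars ((10 : Int) ^ m * 5) = '5' :: List.replicate m '0' := by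
  have hcast : ((10 : Int) ^ m * 5) = ((5 * 10 ^ m : Nat) : Int) := by push_cast; ring
  have hlt : m < 5 * 10 ^ m + 1 := by
    have h10 : m < 10 ^ m := Nat.lt_pow_self (by norm_num)
    have h5 : 10 ^ m ≤ 5 * 10 ^ m := by omega
    omega
  rw [hcast]
  unfold PySem.Int.toChars
  rw [if_neg (not_lt.mpr (by positivity)), Int.toNat_natCast]
  unfold Nat.toDigits
  rw [toDigitsCore_five_pow m _ [] hlt]
  simp

theorem tokPieces_replicate (m : Nat) :
    tokPieces (List.replicate m 'M') = if m = 0 then [] else [List.replicate m '1'] := by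
  rw [tokPieces]
  rcases Nat.eq_zero_or_pos m with hm | hm
  · simp [hm]
  · have hne : List.replicate m 'M' ≠ [] := by simp; omega
    simp [hne]
    omega

theorem takeWhile_sep (m : Nat) (c : Char) (t : List Char) (hc : c ≠ 'M') :
    (List.replicate m 'M' ++ c :: t).takeWhile (· == 'M') = List.replicate m 'M' := by
  rw [List.takeWhile_append]
  simp [hc]

theorem tokPieces_sep (m : Nat) (c : Char) (t : List Char) (hc : c ≠ 'M') :
    tokPieces (List.replicate m 'M' ++ c :: t)
      = ('5' :: List.replicate m '0') :: tokPieces t := by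
  rw [tokPieces]
  have hne : List.replicate m 'M' ++ c :: t ≠ [] := by simp
  have hk : ((List.replicate m 'M' ++ c :: t).takeWhile (· == 'M')).length = m := by
    rw [takeWhile_sep m c t hc]; simp
  have hlen : (List.replicate m 'M' ++ c :: t).length = m + (t.length + 1) := by simp
  simp only [hne, dite_false, hk, hlen]
  rw [if_neg (by omega)]
  congr 1
  rw [List.drop_append]
  simp

theorem aFold (t : List Char) :
    ∀ (m : Nat) (r : List Char),
      (t.foldl aStep (r, m)).1 ++ List.replicate (t.foldl aStep (r, m)).2 '1'
        = r ++ (tokPieces (List.replicate m 'M' ++ t)).flatten := by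
  induction t with
  | nil =>
    intro m r
    simp only [List.foldl_nil, List.append_nil, tokPieces_replicate]
    rcases Nat.eq_zero_or_pos m with hm | hm
    · simp [hm]
    · rw [if_neg (by omega)]; simp
  | cons c t ih =>
    intro m r
    by_cases hc : c = 'M'
    · subst hc
      simp only [List.foldl_cons, aStep, if_true]
      rw [ih (m + 1) r]
      congr 2
      rw [List.replicate_succ', List.append_assoc]
      simp
    · simp only [List.foldl_cons, aStep, if_neg hc]
      rw [ih 0 (r ++ PySem.Int.toChars ((10 : Int) ^ m * 5))]
      rw [tokPieces_sep m c t hc]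
      simp [toChars_five_pow, List.append_assoc]

theorem scanMs_spec (s : List Char) :
    ∀ j, scanMs s s.length j = j + ((s.drop j).takeWhile (· == 'M')).length := by
  intro j
  induction hd : s.length - j using Nat.strong_induction_on generalizing j with
  | _ d ih =>
    rw [scanMs]
    by_cases hj : j < s.length
    · have hget : PySem.List.pyGetD s (j : Int) ' ' = s[j] := by
        rw [PySem.List.pyGetD_eq_getElem s ' ' (by omega) (by exact_mod_cast hj)]
        simp
      have hdrop : s.drop j = s[j] :: s.drop (j + 1) := List.drop_eq_getElem_cons hj
      by_cases hM : s[j] = 'M'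
      · rw [dif_pos ⟨hj, by rw [hget, hM]⟩]
        rw [ih (s.length - (j + 1)) (by omega) (j + 1) rfl]
        rw [hdrop, List.takeWhile_cons, if_pos (by simp [hM])]
        simp only [List.length_cons]
        omega
      · rw [dif_neg (by rw [hget]; tauto)]
        rw [hdrop, List.takeWhile_cons, if_neg (by simp [hM])]
        simp
    · rw [dif_neg (by tauto)]
      rw [List.drop_eq_nil_of_le (by omega)]
      simp

theorem tokLoop_eq (s : List Char) :
    ∀ i (pieces : List (List Char)),
      tokLoop s s.length i pieces = pieces ++ tokPieces (s.drop i) := by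
  intro i
  induction hd : s.length - i using Nat.strong_induction_on generalizing i with
  | _ d ih =>
    intro pieces
    rw [tokLoop]
    by_cases hi : i < s.length
    · have hscan := scanMs_spec s i
      set k := ((s.drop i).takeWhile (· == 'M')).length with hk
      have hkle : k ≤ (s.drop i).length := by
        rw [hk]; exact (List.takeWhile_sublist _).length_le
      have hdl : (s.drop i).length = s.length - i := List.length_drop ..
      rw [if_pos hi]
      have hne : s.drop i ≠ [] := by
        intro h; rw [List.drop_eq_nil_iff] at h; omega
      by_cases hj : scanMs s s.length i = s.length
      · rw [if_pos hj]
        have hkfull : k = (s.drop i).length := by omega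
        rw [tokLoop, if_neg (by omega)]
        rw [tokPieces, dif_neg hne, if_pos (by rw [← hk, hkfull])]
        have h1 : scanMs s s.length i - i = k := by omega
        rw [h1, hk]
      · rw [if_neg hj]
        have hkpart : k < (s.drop i).length := by omega
        rw [ih (s.length - (scanMs s s.length i + 1)) (by omega) _ rfl]
        conv_rhs => rw [tokPieces]
        rw [dif_neg hne, if_neg (by rw [← hk]; omega)]
        have h1 : scanMs s s.length i - i = k := by omega
        have h2 : (s.drop i).drop (k + 1) = s.drop (scanMs s s.length i + 1) := by
          rw [List.drop_drop]; congr 1; omega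
        rw [h1, h2, List.append_assoc, ← hk]
        rfl
    · rw [if_neg hi]
      rw [List.drop_eq_nil_of_le (by omega), tokPieces]
      simp

theorem aFold_range (s : List Char) :
    (PySem.List.pyRange 0 (s.length : Int)).foldl
      (fun (st : List Char × Nat) i =>
        if PySem.List.pyGetD s i ' ' = 'M' then (st.1, st.2 + 1)
        else (st.1 ++ PySem.Int.toChars ((10 : Int) ^ st.2 * 5), 0)) ([], 0)
      = s.foldl aStep ([], 0) :=
  PySem.List.foldl_pyRange_zero_pyGetD' s ' ' aStep ([], 0)

-- ===== VERDICT (by name: the statement is the Claim_ definition above) =====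
theorem maxMK_spec : Claim_equal_maxMK := by
  intro MK _
  unfold Spec_maxMK
  simp only [maxMK, maxMK_alt, PySem.List.slice_to_neg_one]
  generalize MK.toList = l
  rcases eq_or_ne l [] with rfl | hnil
  · rw [tokLoop]
    rw [show ((([] : List Char).length : Int) - 1) = -1 by simp]
    rw [PySem.List.pyRange_one_eq_nil (by norm_num)]
    simp
  · have hlen : ((l.length : Int) - 1) = ((l.dropLast.length : Nat) : Int) := by
      have : 0 < l.length := List.length_pos_of_ne_nil hnil
      simp only [List.length_dropLast]; omega
    rw [hlen]
    rw [PySem.List.foldl_congr_mem (PySem.List.pyRange 0 (l.dropLast.length : Int))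
      (fun (st : List Char × Nat) i =>
        if PySem.List.pyGetD l i ' ' = 'M' then (st.1, st.2 + 1)
        else (st.1 ++ PySem.Int.toChars ((10 : Int) ^ st.2 * 5), 0))
      (fun (st : List Char × Nat) i =>
        if PySem.List.pyGetD l.dropLast i ' ' = 'M' then (st.1, st.2 + 1)
        else (st.1 ++ PySem.Int.toChars ((10 : Int) ^ st.2 * 5), 0))
      ([], 0)
      (by
        intro acc x hx
        dsimp only
        rw [PySem.List.mem_pyRange_one] at hx
        have hdl : l.dropLast.length = l.length - 1 := by simp
        have hl0 : 0 < l.length := List.length_pos_of_ne_nil hnil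
        rw [PySem.List.pyGetD_eq_getElem l ' ' (by omega) (by omega),
            PySem.List.pyGetD_eq_getElem l.dropLast ' ' (by omega) (by omega),
            List.getElem_dropLast])]
    rw [aFold_range l.dropLast]
    rw [tokLoop_eq l.dropLast 0 []]
    have h := aFold l.dropLast 0 []
    simp only [List.replicate, List.nil_append] at h
    rw [List.drop_zero]
    exact congrArg String.ofList h
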